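-- pv_equiv track=rewrite | github.com/epsalt/aoc2017 | day4.py | passphrase
-- ===== SOURCE A (Python) =====
-- from collections import deque
--
-- def passphrase(string, part2 = False):
--     words = string.split(" ")
--     if part2:
--         words = [''.join(sorted(word)) for word in words]
--     deq = deque(words)
--
--     for i in range(len(deq)):
--         word = deq.pop()
--         if word in deq:
--             return False
--         else:
--             deq.appendleft(word)
--     return True
-- ===== SOURCE B (Python) =====
-- def passphrase(string, part2=False):
--     words = string.split(" ")
--     if part2:
--         words = [''.join(sorted(word)) for word in words]
--     ws = sorted(words)
--     for a, b in zip(ws, ws[1:]):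
--         if a == b:
--             return False
--     return True
-- ===== Notes on version B (the rewrite author's own statement) =====
-- stated objective: alternative
-- what changed: Replaced the deque rotation with repeated O(n) membership scans by sorting the word list once and checking adjacent pairs for equality in a single pass.
import Mathlib
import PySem

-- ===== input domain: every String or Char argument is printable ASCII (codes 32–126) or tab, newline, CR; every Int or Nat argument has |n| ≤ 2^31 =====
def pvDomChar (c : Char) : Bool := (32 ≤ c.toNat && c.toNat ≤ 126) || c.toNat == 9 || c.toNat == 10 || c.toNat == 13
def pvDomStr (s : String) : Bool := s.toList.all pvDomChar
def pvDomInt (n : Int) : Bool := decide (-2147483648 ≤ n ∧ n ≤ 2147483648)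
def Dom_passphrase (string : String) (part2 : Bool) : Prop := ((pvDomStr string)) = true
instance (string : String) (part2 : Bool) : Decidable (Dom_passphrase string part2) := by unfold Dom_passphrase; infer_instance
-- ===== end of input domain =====

-- B replaces A's deque rotation with O(n) membership scans by sorting the
-- word list once and comparing adjacent pairs in a single pass (alternative algorithm).
-- ===== PORT A =====
-- join(sorted(word)): Python sorts a string's characters by code point
def pySortWord (w : String) : String := String.ofList (PySem.List.sorted w.toList (fun c => c) false)

-- the deque loop: pop the last element, test membership in the rest, appendleft
def passphraseLoop : Nat → List String → Bool
  | 0, _ => true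
  | n + 1, deq =>
    match deq.getLast? with
    | none => true   -- unreachable: the deque keeps its length, and fuel = initial length
    | some word =>
      let rest := deq.dropLast
      if word ∈ rest then false
      else passphraseLoop n (word :: rest)

def passphrase (string : String) (part2 : Bool) : Bool :=
  let words := (PySem.Chars.splitOn string.toList [' ']).map String.ofList
  let words := if part2 then words.map pySortWord else words
  passphraseLoop words.length words

-- ===== PORT B =====
-- one pass over zip(ws, ws[1:]): false as soon as two neighbours are equal
def adjDistinct : List String → Bool
  | [] => true
  | [_] => true
  | a :: b :: t => if a == b then false else adjDistinct (b :: t)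

def passphrase_alt (string : String) (part2 : Bool) : Bool :=
  let words := (PySem.Chars.splitOn string.toList [' ']).map String.ofList
  let words := if part2 then words.map pySortWord else words
  adjDistinct (PySem.List.sorted words (fun w => w) false)

-- ===== PRECONDITION & SPEC =====
def Spec_passphrase (string : String) (part2 : Bool) (out : Bool) : Prop := out = passphrase_alt string part2
instance (string : String) (part2 : Bool) (out : Bool) : Decidable (Spec_passphrase string part2 out) := by unfold Spec_passphrase; infer_instance

-- ===== CLAIM (what is proved, stated in full; the proofs are below) =====
def Claim_equal_passphrase : Prop := ∀ (string : String) (part2 : Bool), Dom_passphrase string part2 → Spec_passphrase string part2 (passphrase string part2)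

-- ===== LEMMAS AND PROOFS =====

-- ===== VERDICT (by name: the statement is the Claim_ definition above) =====
-- loop invariant: with fuel k = |b|, the loop on a ++ b succeeds iff every
-- element of the back segment b occurs exactly once in the whole deque
lemma loop_char : ∀ (k : Nat) (a b : List String), b.length = k →
    (passphraseLoop k (a ++ b) = true ↔ ∀ x ∈ b, (a ++ b).count x = 1)
  | 0, a, b, hb => by
    have : b = [] := List.eq_nil_of_length_eq_zero hb
    subst this; simp [passphraseLoop]
  | k + 1, a, b, hb => by
    rcases b.eq_nil_or_concat with rfl | ⟨b', x, rfl⟩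
    · simp at hb
    · simp only [List.concat_eq_append] at hb ⊢
      have hb' : b'.length = k := by
        have := hb; simp at this; omega
      have hgl : (a ++ (b' ++ [x])).getLast? = some x := by
        rw [← List.append_assoc, List.getLast?_concat]
      have hdl : (a ++ (b' ++ [x])).dropLast = a ++ b' := by
        rw [← List.append_assoc, List.dropLast_concat]
      have hperm : ((x :: a) ++ b').Perm (a ++ (b' ++ [x])) := by
        rw [← List.append_assoc]
        exact (List.perm_append_singleton x (a ++ b')).symm
      by_cases hmem : x ∈ a ++ b'
      · have hcnt : (a ++ (b' ++ [x])).count x ≠ 1 := by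
          rw [← List.append_assoc, List.count_append]
          have h1 : 1 ≤ (a ++ b').count x := List.one_le_count_iff.mpr hmem
          have h2 : List.count x [x] = 1 := by simp
          omega
        simp only [passphraseLoop, hgl, hdl]
        simp only [hmem, if_true]
        constructor
        · intro h; exact absurd h (by simp)
        · intro h; exact absurd (h x (by simp)) hcnt
      · have hIH := loop_char k (x :: a) b' hb'
        have hstep : passphraseLoop (k + 1) (a ++ (b' ++ [x])) =
            passphraseLoop k ((x :: a) ++ b') := by
          simp only [passphraseLoop, hgl, hdl]
          simp [hmem]
        rw [hstep, hIH]
        have hcx : (a ++ (b' ++ [x])).count x = 1 := by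
          rw [← List.append_assoc, List.count_append]
          simp [List.count_eq_zero_of_not_mem hmem]
        constructor
        · intro h y hy
          rcases (by simpa using hy : y ∈ b' ∨ y = x) with hy' | rfl
          · rw [← hperm.count_eq]; exact h y hy'
          · exact hcx
        · intro h y hy
          rw [hperm.count_eq]; exact h y (by simp [hy])

lemma loop_nodup (l : List String) :
    passphraseLoop l.length l = true ↔ l.Nodup := by
  have := loop_char l.length [] l rfl
  simp only [List.nil_append] at this
  rw [this, List.nodup_iff_count_eq_one]

-- on a (weakly) sorted list, no two adjacent equal elements ⟺ no duplicates at all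
lemma adj_nodup : ∀ (l : List String), l.Pairwise (· ≤ ·) →
    (adjDistinct l = true ↔ l.Nodup)
  | [], _ => by simp [adjDistinct]
  | [a], _ => by simp [adjDistinct]
  | a :: b :: t, h => by
    have hab : a ≤ b := (List.pairwise_cons.mp h).1 b (by simp)
    have ht : (b :: t).Pairwise (· ≤ ·) := (List.pairwise_cons.mp h).2
    by_cases he : a = b
    · subst he; simp [adjDistinct]
    · have hnot : a ∉ b :: t := by
        intro hmem
        rcases List.mem_cons.mp hmem with rfl | hmt
        · exact he rfl
        · have hba : b ≤ a := (List.pairwise_cons.mp ht).1 a hmt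
          exact he (le_antisymm hab hba)
      have hIH := adj_nodup (b :: t) ht
      simp only [adjDistinct, beq_iff_eq, he, if_false, hIH, List.nodup_cons]
      simp [hnot]

theorem passphrase_spec : Claim_equal_passphrase := by
  intro s p2 _
  unfold Spec_passphrase passphrase passphrase_alt
  set words := if p2 then ((PySem.Chars.splitOn s.toList [' ']).map String.ofList).map pySortWord else (PySem.Chars.splitOn s.toList [' ']).map String.ofList with hw
  have hperm : (PySem.List.sorted words (fun w => w) false).Perm words :=
    PySem.List.sorted_perm _ _ _
  have h1 := loop_nodup words
  have h2 := adj_nodup (PySem.List.sorted words (fun w => w) false)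
    (PySem.List.sorted_pairwise _ _)
  rw [Bool.eq_iff_iff, h1, h2, hperm.nodup_iff]
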